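-- pv_equiv track=rewrite | github.com/shivbhakt163/Python-based-DBMS | PQl_User_Server.py | view_table
-- ===== SOURCE A (Python) =====
-- def view_table(dbs,dbnm,tbnm):
--     l = dbs[dbnm][tbnm]
--     l1 = []
--     for i in range(len(l[0])):
--         l2 = []
--         for j in l:
--             l2.append(j[i])
--         l1.append(l2)
--     l3 = []
--     for i in l1:
--         l3.append(len(max(i,key = len)))
--     d = ""
--     for j in l3:
--         d = d+"+"+"-"*(j+1)
--     d = d+"+"
--     c = d+"\n"
--     for i in range(len(l)):
--         for j in range(len(l[0])):
--             c=c+"|"+l[i][j]+" "*(l3[j]-len(l[i][j])+1)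
--         if i==0:
--             c=c+'|\n'+d+"\n"
--         else:
--             c=c+'|\n'
--     c=c+d
--     return c
-- ===== SOURCE B (Python) =====
-- def view_table(dbs, dbnm, tbnm):
--     rows = dbs[dbnm][tbnm]
--     ncols = len(rows[0])
--     # Build one vertical strip per column (its own dash segments and padded
--     # cells), then assemble the picture by zipping the strips horizontally
--     # with the closing border column.
--     strips = []
--     for j in range(ncols):
--         cells = [row[j] for row in rows]
--         w = max(len(c) for c in cells)
--         dash = "+" + "-" * (w + 1)
--         strip = [dash, "|" + cells[0] + " " * (w - len(cells[0]) + 1), dash]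
--         for c in cells[1:]:
--             strip.append("|" + c + " " * (w - len(c) + 1))
--         strip.append(dash)
--         strips.append(strip)
--     border = ["+", "|", "+"] + ["|"] * (len(rows) - 1) + ["+"]
--     return "\n".join("".join(parts) for parts in zip(*strips, border))
-- ===== Notes on version B (the rewrite author's own statement) =====
-- stated objective: alternative
-- what changed: B builds the picture column-by-column — one vertical strip per column (its own dash segments and padded cells) — and assembles the lines by zipping the strips horizontally with the closing border column, instead of A's transpose-then-row-major string accumulation with a precomputed separator line.
import Mathlib
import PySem

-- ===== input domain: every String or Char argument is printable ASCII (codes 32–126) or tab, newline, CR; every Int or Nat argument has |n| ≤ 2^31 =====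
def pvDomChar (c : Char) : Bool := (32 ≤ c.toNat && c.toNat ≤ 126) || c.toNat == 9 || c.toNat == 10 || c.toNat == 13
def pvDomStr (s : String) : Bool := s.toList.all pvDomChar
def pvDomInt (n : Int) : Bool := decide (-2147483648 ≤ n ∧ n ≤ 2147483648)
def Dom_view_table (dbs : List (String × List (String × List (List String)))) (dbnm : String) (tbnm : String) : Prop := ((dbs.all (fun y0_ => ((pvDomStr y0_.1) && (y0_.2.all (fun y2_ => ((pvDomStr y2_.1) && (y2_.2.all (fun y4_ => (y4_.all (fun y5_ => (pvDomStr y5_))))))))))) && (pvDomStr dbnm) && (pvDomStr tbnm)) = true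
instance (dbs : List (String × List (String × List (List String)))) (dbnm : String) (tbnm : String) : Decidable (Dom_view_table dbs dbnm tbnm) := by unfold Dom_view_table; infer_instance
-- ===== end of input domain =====

-- B builds the table column-by-column: one vertical strip per column (dash segments and
-- padded cells), zipped horizontally with the closing border column (objective: alternative).

-- 'dbs[dbnm][tbnm]' — both Pythons start with the same two dict lookups; the default [] stands in
-- where Python raises KeyError (such inputs are excluded by Pre_view_table).
def tableOf (dbs : List (String × List (String × List (List String)))) (dbnm : String) (tbnm : String) : List (List String) :=
  (PySem.Dict.mk ((PySem.Dict.mk dbs).getD dbnm [])).getD tbnm []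

-- ===== PORT A =====
-- 'l1': transpose — for i in range(len(l[0])): for j in l: l2.append(j[i])
def aCols (l : List (List String)) : List (List String) :=
  (PySem.List.pyRange 0 ((PySem.List.pyGetD l 0 []).length : Int)).foldl
    (fun l1 i => l1 ++ [l.foldl (fun l2 j => l2 ++ [PySem.List.pyGetD j i ""]) []]) []

-- 'l3': for i in l1: l3.append(len(max(i, key=len)))
def aWidths (l : List (List String)) : List Int :=
  (aCols l).foldl (fun l3 i => l3 ++ [PySem.Str.len (PySem.List.maxD i PySem.Str.len "")]) []

-- 'd': for j in l3: d = d+"+"+"-"*(j+1)  followed by  d = d+"+"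
def aSep (l : List (List String)) : List Char :=
  (aWidths l).foldl (fun d j => d ++ '+' :: PySem.List.pyRepeat ['-'] (j + 1)) [] ++ ['+']

-- 'c': c = d+"\n" then the double loop over rows/columns, with the separator after row 0
def aBody (l : List (List String)) : List Char :=
  (PySem.List.pyRange 0 (l.length : Int)).foldl (fun c i =>
    let c := (PySem.List.pyRange 0 ((PySem.List.pyGetD l 0 []).length : Int)).foldl (fun c j =>
      c ++ '|' :: (PySem.List.pyGetD (PySem.List.pyGetD l i []) j "").toList
        ++ PySem.List.pyRepeat [' ']
            (PySem.List.pyGetD (aWidths l) j 0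
              - PySem.Str.len (PySem.List.pyGetD (PySem.List.pyGetD l i []) j "") + 1)) c
    if i = 0 then c ++ ['|', '\n'] ++ aSep l ++ ['\n'] else c ++ ['|', '\n'])
    (aSep l ++ ['\n'])

def view_table (dbs : List (String × List (String × List (List String)))) (dbnm : String) (tbnm : String) : String :=
  String.ofList (aBody (tableOf dbs dbnm tbnm) ++ aSep (tableOf dbs dbnm tbnm))

-- ===== PORT B =====
-- one vertical strip for column j: [dash, first padded cell, dash, remaining padded cells…, dash]
def bStrip (rows : List (List String)) (j : Int) : List (List Char) :=
  let cells := rows.map (fun row => PySem.List.pyGetD row j "")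
  let w := PySem.List.maxD (cells.map PySem.Str.len) (fun x => x) 0
  let dash := '+' :: PySem.List.pyRepeat ['-'] (w + 1)
  ([dash,
    '|' :: (PySem.List.pyGetD cells 0 "").toList
      ++ PySem.List.pyRepeat [' '] (w - PySem.Str.len (PySem.List.pyGetD cells 0 "") + 1),
    dash]
   ++ (PySem.List.slice cells (some 1) none).map
        (fun c => '|' :: c.toList ++ PySem.List.pyRepeat [' '] (w - PySem.Str.len c + 1)))
  ++ [dash]

-- '"".join(parts) for parts in zip(*strips, border)': zip truncates at the shortest sequence,
-- join concatenates the heads of the strips and the border element (hand port, exact)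
def zipJoin : List (List (List Char)) → List (List Char) → List (List Char)
  | _, [] => []
  | strips, b :: bs =>
    if strips.all (fun s => !s.isEmpty) then
      ((strips.map (fun s => s.headD [])).flatten ++ b) :: zipJoin (strips.map List.tail) bs
    else []

-- strips = []; for j in range(ncols): strips.append(strip(j))
def bStrips (rows : List (List String)) : List (List (List Char)) :=
  (PySem.List.pyRange 0 ((PySem.List.pyGetD rows 0 []).length : Int)).foldl
    (fun strips j => strips ++ [bStrip rows j]) []

-- border = ["+","|","+"] + ["|"]*(len(rows)-1) + ["+"]
def bBorder (rows : List (List String)) : List (List Char) :=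
  ([['+'], ['|'], ['+']] ++ PySem.List.pyRepeat [['|']] ((rows.length : Int) - 1)) ++ [['+']]

def view_table_alt (dbs : List (String × List (String × List (List String)))) (dbnm : String) (tbnm : String) : String :=
  String.ofList (PySem.Chars.join ['\n']
    (zipJoin (bStrips (tableOf dbs dbnm tbnm)) (bBorder (tableOf dbs dbnm tbnm))))

-- ===== PRECONDITION & SPEC =====
-- Pre_ excludes exactly the inputs where the Python raises: a missing dbnm/tbnm key (KeyError; the
-- lookup default [] then fails 'l ≠ []'), an empty table (IndexError on l[0]) and a row shorter
-- than the first row (IndexError on j[i] / l[i][j]).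
def Pre_view_table (dbs : List (String × List (String × List (List String)))) (dbnm : String) (tbnm : String) : Prop :=
  tableOf dbs dbnm tbnm ≠ [] ∧
    ∀ row ∈ tableOf dbs dbnm tbnm, ((tableOf dbs dbnm tbnm).headD []).length ≤ row.length

instance (dbs : List (String × List (String × List (List String)))) (dbnm : String) (tbnm : String) : Decidable (Pre_view_table dbs dbnm tbnm) := by unfold Pre_view_table; infer_instance

def pvWitness_view_table : (List (String × List (String × List (List String)))) × String × String :=
  ([("db", [("t", [["id", "name"], ["1", "ab"]])])], "db", "t")

def Spec_view_table (dbs : List (String × List (String × List (List String)))) (dbnm : String) (tbnm : String) (out : String) : Prop := out = view_table_alt dbs dbnm tbnm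
instance (dbs : List (String × List (String × List (List String)))) (dbnm : String) (tbnm : String) (out : String) : Decidable (Spec_view_table dbs dbnm tbnm out) := by unfold Spec_view_table; infer_instance

-- ===== CLAIM (what is proved, stated in full; the proofs are below) =====
def Claim_equal_view_table : Prop := ∀ (dbs : List (String × List (String × List (List String)))) (dbnm : String) (tbnm : String), Dom_view_table dbs dbnm tbnm → Pre_view_table dbs dbnm tbnm → Spec_view_table dbs dbnm tbnm (view_table dbs dbnm tbnm)

-- ===== LEMMAS AND PROOFS =====

-- W l k: the width of column k (running max of cell lengths down the column)
def W (l : List (List String)) (k : Nat) : Int :=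
  l.foldl (fun a row => max a (PySem.Str.len (row.getD k ""))) 0

-- the common line shapes both outputs reduce to
def sepSpec (l : List (List String)) : List Char :=
  (List.range (l.headD []).length).flatMap (fun k => '+' :: PySem.List.pyRepeat ['-'] (W l k + 1)) ++ ['+']

def rowSpec (l : List (List String)) (r : List String) : List Char :=
  (List.range (l.headD []).length).flatMap
    (fun k => '|' :: (r.getD k "").toList
      ++ PySem.List.pyRepeat [' '] (W l k - PySem.Str.len (r.getD k "") + 1)) ++ ['|']

def linesSpec (l : List (List String)) : List (List Char) :=
  sepSpec l :: rowSpec l (l.headD []) :: sepSpec l :: (l.tail.map (rowSpec l)) ++ [sepSpec l]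

-- token template for the vertical direction: a dash line or a table row
inductive PTok : Type
  | dash : PTok
  | row : List String → PTok

def template (l : List (List String)) : List PTok :=
  (PTok.dash :: PTok.row (l.headD []) :: PTok.dash :: l.tail.map PTok.row) ++ [PTok.dash]

-- column width as B computes it, at an Int index
def wInt (l : List (List String)) (j : Int) : Int :=
  PySem.List.maxD ((l.map (fun row => PySem.List.pyGetD row j "")).map PySem.Str.len) (fun x => x) 0

-- one cell of a strip: what column j contributes to a dash line / to the row r
def piece (l : List (List String)) (j : Int) : PTok → List Char
  | PTok.dash => '+' :: PySem.List.pyRepeat ['-'] (wInt l j + 1)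
  | PTok.row r => '|' :: (PySem.List.pyGetD r j "").toList
      ++ PySem.List.pyRepeat [' '] (wInt l j - PySem.Str.len (PySem.List.pyGetD r j "") + 1)

def bp : PTok → List Char
  | PTok.dash => ['+']
  | PTok.row _ => ['|']

lemma pyGetD_zero_headD (l : List (List String)) : PySem.List.pyGetD l 0 [] = l.headD [] := by
  cases l <;> simp [pysem]

lemma map_range_getD {α : Type} (xs : List α) (d : α) :
    (List.range xs.length).map (fun k => xs.getD k d) = xs := by
  induction xs with
  | nil => rfl
  | cons x t ih =>
    rw [List.length_cons, List.range_succ_eq_map, List.map_cons, List.map_map]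
    simpa using ih

lemma maxLen_eq_foldl (col : List String) :
    PySem.Str.len (PySem.List.maxD col PySem.Str.len "") =
      col.foldl (fun a s => max a (PySem.Str.len s)) 0 := by
  rcases h : PySem.List.max? col PySem.Str.len with _ | m
  · rw [(PySem.List.max?_eq_none_iff _ _).mp h]
    simp [PySem.List.maxD]
  · have hd : PySem.List.maxD col PySem.Str.len "" = m := by simp [PySem.List.maxD, h]
    rw [hd]
    have h2 : PySem.Str.len m ≤ col.foldl (fun a s => max a (PySem.Str.len s)) 0 :=
      (PySem.List.le_foldl_max_int col PySem.Str.len 0).2 m (PySem.List.max?_mem h)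
    have hF : col.foldl (fun a s => max a (PySem.Str.len s)) 0
        = (col.map PySem.Str.len).foldl max 0 := (List.foldl_map).symm
    have h3 : col.foldl (fun a s => max a (PySem.Str.len s)) 0 ≤ PySem.Str.len m := by
      rw [hF]
      rcases PySem.List.foldl_max_mem (col.map PySem.Str.len) 0 with h0 | hm
      · rw [h0]; simp [PySem.Str.len_eq]
      · obtain ⟨y, hy, hym⟩ := List.mem_map.mp hm
        rw [← hym]; exact PySem.List.max?_isMax h y hy
    exact le_antisymm h2 h3

lemma aCols_eq (l : List (List String)) :
    aCols l = (List.range (PySem.List.pyGetD l 0 []).length).map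
      (fun j => l.map (fun row => row.getD j "")) := by
  unfold aCols
  rw [PySem.List.pyRange_zero_nat, List.foldl_map]
  rw [PySem.List.foldl_append_singleton_eq_map
    (f := fun k : Nat => l.foldl (fun l2 j => l2 ++ [PySem.List.pyGetD j (k : Int) ""]) [])]
  simp only [List.nil_append, PySem.List.pyGetD_natCast]
  refine List.map_congr_left ?_
  intro k _
  rw [PySem.List.foldl_append_singleton_eq_map (f := fun j : List String => j.getD k ""),
    List.nil_append]

lemma aWidths_eq (l : List (List String)) :
    aWidths l = (List.range (l.headD []).length).map (W l) := by
  unfold aWidths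
  rw [PySem.List.foldl_append_singleton_eq_map
    (f := fun i => PySem.Str.len (PySem.List.maxD i PySem.Str.len "")), aCols_eq,
    pyGetD_zero_headD]
  simp only [List.nil_append, List.map_map, Function.comp_def, maxLen_eq_foldl, List.foldl_map]
  rfl

lemma wInt_cast (l : List (List String)) (k : Nat) : wInt l (k : Int) = W l k := by
  unfold wInt W
  have hnn : ∀ x ∈ (l.map (fun row => PySem.List.pyGetD row (k : Int) "")).map PySem.Str.len,
      (0 : Int) ≤ x := by
    intro x hx
    obtain ⟨s, _, rfl⟩ := List.mem_map.mp hx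
    simp [PySem.Str.len_eq]
  rcases hys : (l.map (fun row => PySem.List.pyGetD row (k : Int) "")).map PySem.Str.len
      with _ | ⟨y, t⟩
  · have : l = [] := by
      rcases l with _ | _
      · rfl
      · simp at hys
    subst this; rfl
  · have hy0 : (0 : Int) ≤ y := hnn y (by rw [hys]; exact List.mem_cons_self)
    have hmax : PySem.List.maxD (y :: t) (fun x => x) 0 = t.foldl max y := by
      simp [PySem.List.maxD, PySem.List.max?_id_cons]
    have hfold : (y :: t).foldl max 0 = t.foldl max y := by
      rw [List.foldl_cons, max_eq_right hy0]
    rw [hmax, ← hfold, ← hys, List.foldl_map, List.foldl_map]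
    simp

lemma foldl_emit {α β : Type} (f : List β → α → List β) (g : α → List β)
    (hf : ∀ c x, f c x = c ++ g x) (xs : List α) (acc : List β) :
    xs.foldl f acc = acc ++ xs.flatMap g := by
  induction xs generalizing acc with
  | nil => simp
  | cons x xs ih => rw [List.foldl_cons, hf, ih, List.flatMap_cons, List.append_assoc]

lemma join_newline (a : List Char) (rest : List (List Char)) :
    PySem.Chars.join ['\n'] (a :: rest) = a ++ rest.flatMap (fun x => '\n' :: x) := by
  induction rest generalizing a with
  | nil => simp [PySem.Chars.join_singleton]
  | cons q rest' ih =>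
    rw [PySem.Chars.join_cons_cons, ih]
    simp

lemma newline_rotate (cs : List (List Char)) :
    '\n' :: cs.flatMap (fun x => x ++ ['\n']) = cs.flatMap (fun x => '\n' :: x) ++ ['\n'] := by
  induction cs with
  | nil => rfl
  | cons p rest ih => simp_all

lemma aSep_eq (l : List (List String)) : aSep l = sepSpec l := by
  unfold aSep sepSpec
  rw [PySem.List.foldl_append_eq_flatMap (g := fun j => '+' :: PySem.List.pyRepeat ['-'] (j + 1)),
    aWidths_eq, List.flatMap_map, List.nil_append]

lemma inner_eq (l : List (List String)) (r : List String) :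
    (PySem.List.pyRange 0 ((PySem.List.pyGetD l 0 []).length : Int)).flatMap (fun j =>
        '|' :: (PySem.List.pyGetD r j "").toList
          ++ PySem.List.pyRepeat [' ']
              (PySem.List.pyGetD (aWidths l) j 0 - PySem.Str.len (PySem.List.pyGetD r j "") + 1))
      ++ ['|'] = rowSpec l r := by
  unfold rowSpec
  rw [pyGetD_zero_headD, PySem.List.pyRange_zero_nat, List.flatMap_map]
  congr 1
  rw [List.flatMap_def, List.flatMap_def]
  apply congrArg List.flatten
  refine List.map_congr_left ?_
  intro k hk
  rw [PySem.List.pyGetD_natCast, PySem.List.pyGetD_natCast, aWidths_eq,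
    PySem.List.getD_map_range _ _ _ _ (List.mem_range.mp hk)]

lemma A_eq (l : List (List String)) (h : l ≠ []) :
    aBody l ++ aSep l = PySem.Chars.join ['\n'] (linesSpec l) := by
  obtain ⟨r0, tl, rfl⟩ := List.exists_cons_of_ne_nil h
  -- the outer loop as a flatMap of per-row chunks
  have hA : aBody (r0 :: tl) = (aSep (r0 :: tl) ++ ['\n']) ++
      (PySem.List.pyRange 0 ((r0 :: tl).length : Int)).flatMap (fun i =>
        ((PySem.List.pyRange 0 ((PySem.List.pyGetD (r0 :: tl) 0 []).length : Int)).flatMap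
            (fun j => '|' :: (PySem.List.pyGetD (PySem.List.pyGetD (r0 :: tl) i []) j "").toList
              ++ PySem.List.pyRepeat [' ']
                  (PySem.List.pyGetD (aWidths (r0 :: tl)) j 0
                    - PySem.Str.len
                        (PySem.List.pyGetD (PySem.List.pyGetD (r0 :: tl) i []) j "") + 1))
          ++ ['|'] ++ (if i = 0 then '\n' :: aSep (r0 :: tl) else [])) ++ ['\n']) := by
    unfold aBody
    refine foldl_emit _ _ ?_ _ _
    intro c i
    have hin := foldl_emit
      (fun c j => c ++ '|' :: (PySem.List.pyGetD (PySem.List.pyGetD (r0 :: tl) i []) j "").toList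
        ++ PySem.List.pyRepeat [' ']
            (PySem.List.pyGetD (aWidths (r0 :: tl)) j 0
              - PySem.Str.len (PySem.List.pyGetD (PySem.List.pyGetD (r0 :: tl) i []) j "") + 1))
      (fun j => '|' :: (PySem.List.pyGetD (PySem.List.pyGetD (r0 :: tl) i []) j "").toList
        ++ PySem.List.pyRepeat [' ']
            (PySem.List.pyGetD (aWidths (r0 :: tl)) j 0
              - PySem.Str.len (PySem.List.pyGetD (PySem.List.pyGetD (r0 :: tl) i []) j "") + 1))
      (by intro c j; simp)
      (PySem.List.pyRange 0 ((PySem.List.pyGetD (r0 :: tl) 0 []).length : Int))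
    dsimp only
    rw [hin]
    split <;> simp
  -- per-row chunks in rowSpec form
  have hchunk : ∀ i : Int,
      (PySem.List.pyRange 0 ((PySem.List.pyGetD (r0 :: tl) 0 []).length : Int)).flatMap
          (fun j => '|' :: (PySem.List.pyGetD (PySem.List.pyGetD (r0 :: tl) i []) j "").toList
            ++ PySem.List.pyRepeat [' ']
                (PySem.List.pyGetD (aWidths (r0 :: tl)) j 0
                  - PySem.Str.len
                      (PySem.List.pyGetD (PySem.List.pyGetD (r0 :: tl) i []) j "") + 1))
        ++ ['|'] = rowSpec (r0 :: tl) (PySem.List.pyGetD (r0 :: tl) i []) :=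
    fun i => inner_eq (r0 :: tl) (PySem.List.pyGetD (r0 :: tl) i [])
  -- split off row 0 and name the tail rows
  have hsplit : PySem.List.pyRange 0 (((r0 :: tl).length : Int))
      = 0 :: PySem.List.pyRange 1 (((r0 :: tl).length : Int)) := by
    rw [PySem.List.pyRange_one_cons (by simp)]
    norm_num
  have htail : (PySem.List.pyRange 1 (((r0 :: tl).length : Int))).flatMap
      (fun i => (rowSpec (r0 :: tl) (PySem.List.pyGetD (r0 :: tl) i []) ++ []) ++ ['\n'])
      = tl.flatMap (fun r => rowSpec (r0 :: tl) r ++ ['\n']) := by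
    rw [PySem.List.pyRange_one, List.flatMap_map]
    have hlen : ((((r0 :: tl).length : Int)) - 1).toNat = tl.length := by
      simp
    rw [hlen]
    have hconv : ∀ k ∈ List.range tl.length,
        (rowSpec (r0 :: tl) (PySem.List.pyGetD (r0 :: tl) ((1 : Int) + (k : Int)) []) ++ [])
            ++ ['\n']
          = rowSpec (r0 :: tl) (tl.getD k []) ++ ['\n'] := by
      intro k _
      have : (1 : Int) + (k : Int) = ((k + 1 : Nat) : Int) := by push_cast; ring
      rw [this, PySem.List.pyGetD_natCast]
      simp
    rw [List.flatMap_def, List.flatMap_def, List.map_congr_left hconv, ← List.flatMap_def,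
      ← List.flatMap_def]
    have h2 : tl.flatMap (fun r => rowSpec (r0 :: tl) r ++ ['\n'])
        = ((List.range tl.length).map (fun k => tl.getD k [])).flatMap
            (fun r => rowSpec (r0 :: tl) r ++ ['\n']) := by
      rw [map_range_getD]
    rw [h2, List.flatMap_map]
  -- the ite vanishes on the tail range
  have hite : (PySem.List.pyRange 1 (((r0 :: tl).length : Int))).flatMap (fun i =>
        ((PySem.List.pyRange 0 ((PySem.List.pyGetD (r0 :: tl) 0 []).length : Int)).flatMap
            (fun j => '|' :: (PySem.List.pyGetD (PySem.List.pyGetD (r0 :: tl) i []) j "").toList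
              ++ PySem.List.pyRepeat [' ']
                  (PySem.List.pyGetD (aWidths (r0 :: tl)) j 0
                    - PySem.Str.len
                        (PySem.List.pyGetD (PySem.List.pyGetD (r0 :: tl) i []) j "") + 1))
          ++ ['|'] ++ (if i = 0 then '\n' :: aSep (r0 :: tl) else [])) ++ ['\n'])
      = tl.flatMap (fun r => rowSpec (r0 :: tl) r ++ ['\n']) := by
    rw [← htail]
    rw [List.flatMap_def, List.flatMap_def]
    apply congrArg List.flatten
    refine List.map_congr_left ?_
    intro i hi
    have h1 : (1 : Int) ≤ i := (PySem.List.mem_pyRange_one.mp hi).1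
    have hne : ¬ i = 0 := by omega
    rw [if_neg hne, List.append_assoc, hchunk i]
    simp
  rw [hA, hsplit, List.flatMap_cons, hite]
  rw [if_pos rfl, List.append_assoc, hchunk 0]
  have hr0 : PySem.List.pyGetD (r0 :: tl) 0 [] = r0 := by
    rw [pyGetD_zero_headD]; rfl
  rw [hr0, aSep_eq]
  -- the tail rows as a flatMap over the row lines
  have hT : (tl.map (rowSpec (r0 :: tl))).flatMap (fun x => x ++ ['\n'])
      = tl.flatMap (fun r => rowSpec (r0 :: tl) r ++ ['\n']) := by
    rw [List.flatMap_map]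
  rw [← hT]
  have hrot := newline_rotate (tl.map (rowSpec (r0 :: tl)))
  -- expand the joined spec lines
  unfold linesSpec
  rw [List.cons_append, List.cons_append, List.cons_append, join_newline]
  simp only [List.flatMap_cons, List.flatMap_append, List.flatMap_nil, List.append_nil,
    List.headD_cons, List.tail_cons]
  -- both sides are now appends of the same atoms
  rw [show sepSpec (r0 :: tl) ++ ['\n']
        ++ (rowSpec (r0 :: tl) r0 ++ '\n' :: sepSpec (r0 :: tl) ++ ['\n']
            ++ (tl.map (rowSpec (r0 :: tl))).flatMap (fun x => x ++ ['\n'])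
            ++ sepSpec (r0 :: tl))
      = sepSpec (r0 :: tl) ++ '\n' :: rowSpec (r0 :: tl) r0 ++ '\n' :: sepSpec (r0 :: tl)
        ++ ('\n' :: (tl.map (rowSpec (r0 :: tl))).flatMap (fun x => x ++ ['\n']))
        ++ sepSpec (r0 :: tl) from by simp]
  rw [hrot]
  simp

-- B side --------------------------------------------------------------------

lemma bStrip_eq (l : List (List String)) (h : l ≠ []) (j : Int) :
    bStrip l j = (template l).map (piece l j) := by
  obtain ⟨r0, tl, rfl⟩ := List.exists_cons_of_ne_nil h
  unfold bStrip template
  dsimp only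
  rw [PySem.List.slice_from_one]
  simp [piece, wInt, List.map_map, Function.comp_def]

lemma zipJoin_map (ts : List PTok) (cols : List Int)
    (pc : Int → PTok → List Char) (b : PTok → List Char) :
    zipJoin (cols.map (fun j => ts.map (pc j))) (ts.map b)
      = ts.map (fun t => (cols.map (fun j => pc j t)).flatten ++ b t) := by
  induction ts generalizing cols with
  | nil => rfl
  | cons t ts ih =>
    rw [List.map_cons, List.map_cons, zipJoin]
    have hall : (cols.map (fun j => (t :: ts).map (pc j))).all (fun s => !s.isEmpty) = true := by
      simp [List.all_map]
    rw [if_pos hall]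
    have hheads : (cols.map (fun j => (t :: ts).map (pc j))).map (fun s => s.headD [])
        = cols.map (fun j => pc j t) := by
      rw [List.map_map]; rfl
    have htails : (cols.map (fun j => (t :: ts).map (pc j))).map List.tail
        = cols.map (fun j => ts.map (pc j)) := by
      rw [List.map_map]; rfl
    rw [hheads, htails, ih]

lemma line_dash (l : List (List String)) :
    ((PySem.List.pyRange 0 ((l.headD []).length : Int)).map
        (fun j => piece l j PTok.dash)).flatten ++ bp PTok.dash = sepSpec l := by
  unfold sepSpec
  rw [PySem.List.pyRange_zero_nat, List.map_map, List.flatMap_def]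
  congr 1
  apply congrArg List.flatten
  refine List.map_congr_left ?_
  intro k _
  simp [piece, wInt_cast]

lemma line_row (l : List (List String)) (r : List String) :
    ((PySem.List.pyRange 0 ((l.headD []).length : Int)).map
        (fun j => piece l j (PTok.row r))).flatten ++ bp (PTok.row r) = rowSpec l r := by
  unfold rowSpec
  rw [PySem.List.pyRange_zero_nat, List.map_map, List.flatMap_def]
  congr 1
  apply congrArg List.flatten
  refine List.map_congr_left ?_
  intro k _
  simp [piece, wInt_cast]

lemma B_eq (l : List (List String)) (h : l ≠ []) :
    zipJoin (bStrips l) (bBorder l) = linesSpec l := by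
  obtain ⟨r0, tl, rfl⟩ := List.exists_cons_of_ne_nil h
  have hstrips : bStrips (r0 :: tl)
      = (PySem.List.pyRange 0 ((( (r0 :: tl).headD []).length : Int))).map
          (fun j => (template (r0 :: tl)).map (piece (r0 :: tl) j)) := by
    unfold bStrips
    rw [PySem.List.foldl_append_singleton_eq_map, List.nil_append, pyGetD_zero_headD]
    refine List.map_congr_left ?_
    intro j _
    exact bStrip_eq (r0 :: tl) (by simp) j
  have hborder : bBorder (r0 :: tl) = (template (r0 :: tl)).map bp := by
    unfold bBorder template
    have hlen : (((r0 :: tl).length : Int) - 1) = (tl.length : Int) := by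
      simp
    rw [hlen, PySem.List.pyRepeat_singleton]
    simp [Function.comp_def, bp, List.map_const']
  rw [hstrips, hborder, zipJoin_map]
  unfold linesSpec template
  simp only [List.map_append, List.map_cons, List.map_map, List.map_nil, Function.comp_def]
  rw [line_dash, line_row, List.map_congr_left (fun r _ => line_row (r0 :: tl) r)]

-- ===== VERDICT (by name: the statement is the Claim_ definition above) =====
theorem view_table_spec : Claim_equal_view_table := by
  intro dbs dbnm tbnm _ hpre
  unfold Spec_view_table view_table view_table_alt
  apply congrArg String.ofList
  rw [A_eq _ hpre.1, B_eq _ hpre.1]
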